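-- pv_equiv track=rewrite | github.com/cmscleberson/motifsBF | motifsbf.py | identOccur
-- ===== SOURCE A (Python) =====
-- def newList():
--     listCl = []
--     for i in range(0, 27):
--         listCl.append(0)
--     return listCl
--
-- def identOccur(regsList):
--     regsOccurrences = []
--     regsValues = []
--     listOccFinal = []
--
--     for i in range(97, 124):
--         regsValues.append(i)
--         regsOccurrences.append(0)
--
--     for i in range(len(regsList)):
--         listOcc = newList()
--
--         for j in range(len(regsList[i])):
--             local = ord(regsList[i][j])
--             for k in range(len(regsValues)):
--                 if regsValues[k] == local:
--                     listOcc[k] = 1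
--         listOccFinal.append(listOcc.copy())
--
--     return listOccFinal
-- ===== SOURCE B (Python) =====
-- def identOccur(regsList):
--     result = []
--     for s in regsList:
--         present = {ord(c) for c in s}
--         result.append([1 if code in present else 0 for code in range(97, 124)])
--     return result
-- ===== Notes on version B (the rewrite author's own statement) =====
-- stated objective: idiomatic
-- what changed: Instead of scanning all 27 candidate codes for every character (triple nested index loops), B builds a set of the ord-values present in each string once and then produces the 27-entry indicator row by a single membership-checking comprehension over range(97,124).
import Mathlib
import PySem

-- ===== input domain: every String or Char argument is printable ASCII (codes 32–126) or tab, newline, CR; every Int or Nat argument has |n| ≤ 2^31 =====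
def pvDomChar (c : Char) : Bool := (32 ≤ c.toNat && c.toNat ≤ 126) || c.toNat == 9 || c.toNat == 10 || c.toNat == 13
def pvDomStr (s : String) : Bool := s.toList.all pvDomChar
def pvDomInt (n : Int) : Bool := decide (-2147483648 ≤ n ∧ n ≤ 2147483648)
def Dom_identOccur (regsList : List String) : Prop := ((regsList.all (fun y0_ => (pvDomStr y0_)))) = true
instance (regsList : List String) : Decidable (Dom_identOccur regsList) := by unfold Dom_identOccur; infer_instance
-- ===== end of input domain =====

-- B builds a per-string set of present ord-values and maps a membership test over the 27 codes,
-- replacing A's per-character scan of all candidate codes (objective: idiomatic).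

-- ===== PORT A =====
-- port of newList()
def pvNewList : List Int :=
  (PySem.List.pyRange 0 27 1).foldl (fun acc _ => acc ++ [(0 : Int)]) []

def identOccur (regsList : List String) : List (List Int) :=
  let regsValues : List Int :=
    (PySem.List.pyRange 97 124 1).foldl (fun acc i => acc ++ [i]) []
  let _regsOccurrences : List Int :=
    (PySem.List.pyRange 97 124 1).foldl (fun acc _ => acc ++ [(0 : Int)]) []
  (PySem.List.pyRange 0 (PySem.List.len regsList) 1).foldl (fun listOccFinal i =>
    let s : List Char := (PySem.List.pyGetD regsList i "").toList
    let listOcc : List Int :=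
      (PySem.List.pyRange 0 (PySem.List.len s) 1).foldl (fun lo j =>
        let lcl : Int := ((PySem.List.pyGetD s j ' ').toNat : Int)
        (PySem.List.pyRange 0 (PySem.List.len regsValues) 1).foldl (fun lo2 k =>
          if PySem.List.pyGetD regsValues k 0 = lcl then PySem.List.pySetD lo2 k 1 else lo2) lo)
        pvNewList
    listOccFinal ++ [listOcc]) []

-- ===== PORT B =====
def identOccur_alt (regsList : List String) : List (List Int) :=
  regsList.foldl (fun result s =>
    let present : PySem.Set Int := PySem.Set.ofList (s.toList.map (fun c => (c.toNat : Int)))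
    result ++ [(PySem.List.pyRange 97 124 1).map
      (fun code => if PySem.Set.contains present code then (1 : Int) else 0)]) []

-- ===== PRECONDITION & SPEC =====
def Spec_identOccur (regsList : List String) (out : List (List Int)) : Prop := out = identOccur_alt regsList
instance (regsList : List String) (out : List (List Int)) : Decidable (Spec_identOccur regsList out) := by unfold Spec_identOccur; infer_instance

-- ===== CLAIM (what is proved, stated in full; the proofs are below) =====
def Claim_equal_identOccur : Prop := ∀ (regsList : List String), Dom_identOccur regsList → Spec_identOccur regsList (identOccur regsList)

-- ===== LEMMAS AND PROOFS =====

def pvOrdInt (c : Char) : Int := (c.toNat : Int)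

lemma pv_set_map_range (n m : Nat) (g : Nat → Int) (x : Int) (_hm : m < n) :
    ((List.range n).map g).set m x = (List.range n).map (fun k => if k = m then x else g k) := by
  apply List.ext_getElem
  · simp
  · intro i h1 h2
    simp only [List.getElem_set, List.getElem_map, List.getElem_range]
    by_cases h : i = m
    · simp [h]
    · rw [if_neg (fun hh => h hh.symm), if_neg h]

lemma pv_pyRange_codes :
    PySem.List.pyRange 97 124 1 = (List.range 27).map (fun k : Nat => (97 : Int) + (k : Int)) := by
  rw [PySem.List.pyRange_one]
  norm_num
  rfl

lemma pv_newList_eq : pvNewList = (List.range 27).map (fun _ => (0 : Int)) := by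
  unfold pvNewList
  rw [show (fun (acc : List Int) (_ : Int) => acc ++ [(0:Int)]) = (fun acc x => acc ++ [(fun _ => (0:Int)) x]) from rfl,
      PySem.List.foldl_append_singleton_eq_map,
      show ((27 : Int)) = ((27 : Nat) : Int) from rfl, PySem.List.pyRange_zero_nat, List.map_map]
  rfl

lemma pv_regsValues_eq :
    (PySem.List.pyRange 97 124 1).foldl (fun acc i => acc ++ [i]) ([] : List Int)
      = PySem.List.pyRange 97 124 1 := by
  simpa using PySem.List.foldl_append_singleton (PySem.List.pyRange 97 124 1) []

lemma pv_inner_partial (v : Int) (g : Nat → Int) (m : Nat) (hm : m ≤ 27) :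
    (PySem.List.pyRange 0 (m : Int) 1).foldl (fun lo2 k =>
        if PySem.List.pyGetD (PySem.List.pyRange 97 124 1) k 0 = v then PySem.List.pySetD lo2 k 1 else lo2)
      ((List.range 27).map g)
    = (List.range 27).map (fun k : Nat => if k < m ∧ (97 : Int) + (k : Int) = v then 1 else g k) := by
  induction m generalizing g with
  | zero =>
    rw [show ((0 : Nat) : Int) = 0 from rfl, PySem.List.pyRange_one_eq_nil le_rfl]
    simp
  | succ m ih =>
    rw [show ((m + 1 : Nat) : Int) = (m : Int) + 1 by push_cast; ring,
        PySem.List.pyRange_one_succ_right (by positivity), List.foldl_append,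
        ih g (by omega), List.foldl_cons, List.foldl_nil]
    have hget : PySem.List.pyGetD (PySem.List.pyRange 97 124 1) (m : Int) 0 = (97 : Int) + m := by
      rw [PySem.List.pyGetD_natCast, pv_pyRange_codes,
          PySem.List.getD_map_range (fun k : Nat => (97 : Int) + (k : Int)) 27 m 0 (by omega)]
    rw [hget]
    by_cases hv : (97 : Int) + m = v
    · rw [if_pos hv, PySem.List.pySetD_natCast, pv_set_map_range 27 m _ 1 (by omega)]
      apply List.map_congr_left
      intro k hk
      simp only [List.mem_range] at hk
      by_cases h1 : k = m
      · subst h1; simp [hv]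
      · have : (k < m + 1 ∧ (97 : Int) + k = v) ↔ (k < m ∧ (97 : Int) + k = v) := by
          constructor
          · rintro ⟨ha, hb⟩
            exact ⟨by omega, hb⟩
          · rintro ⟨ha, hb⟩
            exact ⟨by omega, hb⟩
        rw [if_neg h1]
        simp only [this]
    · rw [if_neg hv]
      apply List.map_congr_left
      intro k hk
      simp only [List.mem_range] at hk
      have : (k < m + 1 ∧ (97 : Int) + k = v) ↔ (k < m ∧ (97 : Int) + k = v) := by
        constructor
        · rintro ⟨ha, hb⟩
          rcases Nat.lt_succ_iff_lt_or_eq.mp ha with h | h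
          · exact ⟨h, hb⟩
          · subst h; exact absurd hb hv
        · rintro ⟨ha, hb⟩
          exact ⟨by omega, hb⟩
      simp only [this]

lemma pv_inner_eval (v : Int) (g : Nat → Int) :
    (PySem.List.pyRange 0 (PySem.List.len (PySem.List.pyRange 97 124 1)) 1).foldl (fun lo2 k =>
        if PySem.List.pyGetD (PySem.List.pyRange 97 124 1) k 0 = v then PySem.List.pySetD lo2 k 1 else lo2)
      ((List.range 27).map g)
    = (List.range 27).map (fun k : Nat => if (97 : Int) + (k : Int) = v then 1 else g k) := by
  have hlen : PySem.List.len (PySem.List.pyRange 97 124 1) = ((27 : Nat) : Int) := by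
    rw [pv_pyRange_codes]; simp
  rw [hlen, pv_inner_partial v g 27 le_rfl]
  apply List.map_congr_left
  intro k hk
  simp only [List.mem_range] at hk
  simp [hk]

lemma pv_char_fold (cs : List Char) (g : Nat → Int) :
    cs.foldl (fun lo c =>
        (PySem.List.pyRange 0 (PySem.List.len (PySem.List.pyRange 97 124 1)) 1).foldl (fun lo2 k =>
          if PySem.List.pyGetD (PySem.List.pyRange 97 124 1) k 0 = ((c.toNat : Int)) then PySem.List.pySetD lo2 k 1 else lo2) lo)
      ((List.range 27).map g)
    = (List.range 27).map (fun k : Nat => if ((97 : Int) + (k : Int)) ∈ cs.map pvOrdInt then 1 else g k) := by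
  induction cs generalizing g with
  | nil => simp
  | cons c cs ih =>
    rw [List.foldl_cons, pv_inner_eval, ih]
    apply List.map_congr_left
    intro k _
    rw [List.map_cons]
    by_cases h2 : ((97 : Int) + k) ∈ cs.map pvOrdInt
    · rw [if_pos h2, if_pos (List.mem_cons.mpr (Or.inr h2))]
    · rw [if_neg h2]
      by_cases h1 : (97 : Int) + k = (c.toNat : Int)
      · rw [if_pos h1,
            if_pos (List.mem_cons.mpr (Or.inl (show (97:Int) + (k:Int) = pvOrdInt c from h1)))]
      · rw [if_neg h1, if_neg ?_]
        intro h
        rcases List.mem_cons.mp h with h | h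
        · exact h1 h
        · exact h2 h

lemma pv_row_eq (s : String) :
    (PySem.List.pyRange 0 (PySem.List.len s.toList) 1).foldl (fun lo j =>
        (PySem.List.pyRange 0 (PySem.List.len (PySem.List.pyRange 97 124 1)) 1).foldl (fun lo2 k =>
          if PySem.List.pyGetD (PySem.List.pyRange 97 124 1) k 0
              = (((PySem.List.pyGetD s.toList j ' ').toNat : Int)) then PySem.List.pySetD lo2 k 1 else lo2) lo)
      pvNewList
    = (PySem.List.pyRange 97 124 1).map
        (fun code => if PySem.Set.contains (PySem.Set.ofList (s.toList.map (fun c => (c.toNat : Int)))) code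
          then (1 : Int) else 0) := by
  rw [PySem.List.foldl_pyRange_zero_pyGetD s.toList ' '
        (fun lo c =>
          (PySem.List.pyRange 0 (PySem.List.len (PySem.List.pyRange 97 124 1)) 1).foldl (fun lo2 k =>
            if PySem.List.pyGetD (PySem.List.pyRange 97 124 1) k 0 = ((c.toNat : Int))
            then PySem.List.pySetD lo2 k 1 else lo2) lo) pvNewList]
  rw [pv_newList_eq, pv_char_fold, pv_pyRange_codes, List.map_map]
  apply List.map_congr_left
  intro k _
  simp only [Function.comp]
  have hiff : PySem.Set.contains (PySem.Set.ofList (s.toList.map (fun c => (c.toNat : Int)))) ((97:Int) + k) = true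
      ↔ ((97 : Int) + k) ∈ s.toList.map pvOrdInt := by
    rw [PySem.Set.contains_iff, PySem.Set.mem_ofList]
    simp [pvOrdInt]
  by_cases hmem : ((97 : Int) + k) ∈ s.toList.map pvOrdInt
  · rw [if_pos hmem, if_pos (hiff.mpr hmem)]
  · rw [if_neg hmem, if_neg (fun h => hmem (hiff.mp h))]

-- ===== VERDICT (by name: the statement is the Claim_ definition above) =====
theorem identOccur_spec : Claim_equal_identOccur := by
  intro regsList _
  unfold Spec_identOccur identOccur identOccur_alt
  simp only [pv_regsValues_eq]
  rw [PySem.List.foldl_pyRange_zero_pyGetD regsList ""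
        (fun listOccFinal s =>
          listOccFinal ++ [(PySem.List.pyRange 0 (PySem.List.len s.toList) 1).foldl (fun lo j =>
            (PySem.List.pyRange 0 (PySem.List.len (PySem.List.pyRange 97 124 1)) 1).foldl (fun lo2 k =>
              if PySem.List.pyGetD (PySem.List.pyRange 97 124 1) k 0
                  = (((PySem.List.pyGetD s.toList j ' ').toNat : Int)) then PySem.List.pySetD lo2 k 1 else lo2) lo)
            pvNewList]) []]
  rw [PySem.List.foldl_append_singleton_eq_map, PySem.List.foldl_append_singleton_eq_map]
  apply List.map_congr_left
  intro s _
  exact pv_row_eq s
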